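-- pv_equiv track=rewrite | github.com/vvchldmsdn/R-TIL | 0125_TIL/ws.py | low_and_up
-- ===== SOURCE A (Python) =====
-- def low_and_up(word):
--     if len(word) == 0:
--         return ''
--     else:
--         if len(word) % 2 == 0:
--             return word[0].capitalize() + low_and_up(word[1:])
--         else:
--             return word[0] + low_and_up(word[1:])
-- ===== SOURCE B (Python) =====
-- def low_and_up(word):
--     n = len(word)
--     out = []
--     for i, c in enumerate(word):
--         out.append(c.upper() if (n - i) % 2 == 0 else c)
--     return ''.join(out)
-- ===== Notes on version B (the rewrite author's own statement) =====
-- stated objective: faster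
-- what changed: Replaces A's recursion over successive suffixes (each word[1:] copies the string, giving quadratic work in CPython) by a single forward pass with enumerate and an accumulator list joined once.
import Mathlib
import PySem

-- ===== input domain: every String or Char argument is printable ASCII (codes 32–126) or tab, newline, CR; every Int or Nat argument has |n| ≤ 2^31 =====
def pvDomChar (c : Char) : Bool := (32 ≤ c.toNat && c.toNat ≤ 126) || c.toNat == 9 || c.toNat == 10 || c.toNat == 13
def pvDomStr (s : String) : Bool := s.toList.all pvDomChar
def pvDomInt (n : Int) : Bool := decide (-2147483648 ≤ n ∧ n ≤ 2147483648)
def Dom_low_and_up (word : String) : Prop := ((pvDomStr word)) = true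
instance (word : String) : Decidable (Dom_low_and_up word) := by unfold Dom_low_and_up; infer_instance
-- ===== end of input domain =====

-- B replaces A's suffix recursion (quadratic from word[1:] copies) by one forward enumerate pass with an accumulator; faster (asymptotic).


-- ===== PORT A =====
-- A's recursion on the suffixes; word[0].capitalize() on a single char = upperChar (exact on ASCII).
def lowUpA : List Char → List Char
  | [] => []
  | c :: rest =>
      (if (c :: rest).length % 2 == 0 then PySem.Chars.upperChar c else c) :: lowUpA rest

def low_and_up (word : String) : String := String.mk (lowUpA word.toList)

-- ===== PORT B =====
-- one pass: for i, c in enumerate(word): append upper(c) if (n - i) % 2 == 0 else c; join.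
def low_and_up_alt (word : String) : String :=
  let n : Int := (word.toList.length : Int)
  String.mk ((PySem.List.enumerate word.toList).foldl
    (fun acc (p : Int × Char) =>
      acc ++ [if (n - p.1) % 2 == 0 then PySem.Chars.upperChar p.2 else p.2]) [])

-- ===== PRECONDITION & SPEC =====
def Spec_low_and_up (word : String) (out : String) : Prop := out = low_and_up_alt word
instance (word : String) (out : String) : Decidable (Spec_low_and_up word out) := by unfold Spec_low_and_up; infer_instance

-- ===== CLAIM (what is proved, stated in full; the proofs are below) =====
def Claim_equal_low_and_up : Prop := ∀ (word : String), Dom_low_and_up word → Spec_low_and_up word (low_and_up word)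

-- ===== LEMMAS AND PROOFS =====

theorem lowUpB_fold (n : Int) :
    ∀ (l : List Char) (s : Int) (acc : List Char), n - s = (l.length : Int) →
      (PySem.List.enumerate l s).foldl
        (fun acc (p : Int × Char) =>
          acc ++ [if (n - p.1) % 2 == 0 then PySem.Chars.upperChar p.2 else p.2]) acc
      = acc ++ lowUpA l := by
  intro l
  induction l with
  | nil => intro s acc _; simp [PySem.List.enumerate_nil, lowUpA]
  | cons c rest ih =>
      intro s acc h
      rw [PySem.List.enumerate_cons, List.foldl_cons, ih (s + 1) _ (by simp at h ⊢; omega)]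
      have hpar : ((n - s) % 2 == 0) = (((c :: rest).length % 2 : Nat) == 0) := by
        simp only [List.length_cons] at h ⊢
        have : n - s = ((rest.length + 1 : Nat) : Int) := h
        rcases Nat.even_or_odd (rest.length + 1) with he | ho
        · have h2 : (rest.length + 1) % 2 = 0 := Nat.even_iff.mp he
          have h2' : (n - s) % 2 = 0 := by omega
          simp [h2, h2']
        · have h2 : (rest.length + 1) % 2 = 1 := Nat.odd_iff.mp ho
          have h2' : (n - s) % 2 = 1 := by omega
          simp [h2, h2']
      rw [hpar]
      simp [lowUpA]

-- ===== VERDICT (by name: the statement is the Claim_ definition above) =====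
theorem low_and_up_spec : Claim_equal_low_and_up := by
  intro word _
  unfold Spec_low_and_up low_and_up low_and_up_alt
  exact congrArg String.mk (lowUpB_fold _ word.toList 0 [] (by simp)).symm
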